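-- pv_equiv track=rewrite | github.com/Eesha-Pradeep/Small-Codes | Black_Jack.py | blackjack_hand_greater_than
-- ===== SOURCE A (Python) =====
-- def blackjack_hand_greater_than(hand_1, hand_2):
--   def calculate_score(hand):
--     p = dict.fromkeys(["K","Q","J"],10)
--     p["A"] = 11
--     score = sum([int(i) if i.isdigit() else p[i] for i in hand])
--     if "A" in hand and score>21:
--       c = hand.count("A")
--       while score>21 and c!=0:
--         score-=10
--         c-=1
--     return score
--
--   h1_score = calculate_score(hand_1)
--   h2_score = calculate_score(hand_2)
--
--   if (h2_score>21 or h1_score>h2_score) and h1_score<=21: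
--     return True
--   else:
--     return False
-- ===== SOURCE B (Python) =====
-- def blackjack_hand_greater_than(hand_1, hand_2):
--     vals = {"K": 10, "Q": 10, "J": 10, "A": 1}
--
--     def score(hand):
--         # count every ace as 1, then promote one ace to 11 if it fits
--         base = sum(int(c) if c.isdigit() else vals[c] for c in hand)
--         if "A" in hand and base + 10 <= 21:
--             base += 10
--         return base
--
--     h1 = score(hand_1)
--     h2 = score(hand_2)
--     return (h2 > 21 or h1 > h2) and h1 <= 21
-- ===== Notes on version B (the rewrite author's own statement) =====
-- stated objective: simpler
-- what changed: Replaces A's while-loop that repeatedly subtracts 10 per ace with a single closed-form promotion: score every ace as 1 and add 10 once iff the hand has an ace and that still fits under 21 (two 11-aces always bust, so at most one promotion ever survives).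
import Mathlib
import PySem

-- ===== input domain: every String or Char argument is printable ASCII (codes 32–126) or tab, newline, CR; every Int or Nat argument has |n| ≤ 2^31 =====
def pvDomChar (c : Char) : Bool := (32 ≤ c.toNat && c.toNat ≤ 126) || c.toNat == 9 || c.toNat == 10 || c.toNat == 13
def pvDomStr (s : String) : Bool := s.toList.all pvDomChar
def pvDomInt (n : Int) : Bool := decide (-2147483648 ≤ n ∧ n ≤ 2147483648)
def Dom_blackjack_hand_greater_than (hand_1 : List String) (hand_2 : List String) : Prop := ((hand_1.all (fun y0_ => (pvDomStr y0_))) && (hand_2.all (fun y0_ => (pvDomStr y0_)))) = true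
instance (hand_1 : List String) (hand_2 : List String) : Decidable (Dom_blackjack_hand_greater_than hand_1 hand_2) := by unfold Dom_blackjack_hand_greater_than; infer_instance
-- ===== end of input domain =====

-- B replaces A's per-ace subtraction loop by scoring aces as 1 plus one closed-form +10 promotion; equal results proved on Pre_ (hands of digit tokens and K/Q/J/A).

-- ===== PORT A =====
def pvDictA : PySem.Dict String Int :=
  -- p = dict.fromkeys(["K","Q","J"],10); p["A"] = 11
  ((((PySem.Dict.empty).insert "K" 10).insert "Q" 10).insert "J" 10).insert "A" 11

-- int(i) if i.isdigit() else p[i]; the .getD 0 defaults are unreachable under Pre_ (Python raises KeyError there)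
def pvTermA (i : String) : Int :=
  if PySem.Str.strIsdigit i then (PySem.Int.ofStr? i).getD 0 else (pvDictA.get? i).getD 0

-- while score>21 and c!=0: score-=10; c-=1
def pvLoopA (score : Int) (c : Nat) : Int :=
  match c with
  | 0 => score
  | Nat.succ c' => if score > 21 then pvLoopA (score - 10) c' else score

def pvCalcScoreA (hand : List String) : Int :=
  let score := hand.foldl (fun acc i => acc + pvTermA i) 0
  if hand.contains "A" && decide (score > 21) then
    pvLoopA score (PySem.List.count hand "A")
  else score

def blackjack_hand_greater_than (hand_1 : List String) (hand_2 : List String) : Bool :=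
  let h1_score := pvCalcScoreA hand_1
  let h2_score := pvCalcScoreA hand_2
  if (decide (h2_score > 21) || decide (h1_score > h2_score)) && decide (h1_score ≤ 21) then true else false

-- ===== PORT B =====
def pvValsB : PySem.Dict String Int :=
  PySem.Dict.ofList [("K", 10), ("Q", 10), ("J", 10), ("A", 1)]

def pvTermB (i : String) : Int :=
  if PySem.Str.strIsdigit i then (PySem.Int.ofStr? i).getD 0 else (pvValsB.get? i).getD 0

def pvScoreB (hand : List String) : Int :=
  let base := hand.foldl (fun acc i => acc + pvTermB i) 0
  if hand.contains "A" && decide (base + 10 ≤ 21) then base + 10 else base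

def blackjack_hand_greater_than_alt (hand_1 : List String) (hand_2 : List String) : Bool :=
  let h1 := pvScoreB hand_1
  let h2 := pvScoreB hand_2
  (decide (h2 > 21) || decide (h1 > h2)) && decide (h1 ≤ 21)

-- ===== PRECONDITION & SPEC =====
-- Pre_ excludes exactly the hands with a token that is neither a digit string nor K/Q/J/A: Python A raises KeyError there.
def Pre_blackjack_hand_greater_than (hand_1 : List String) (hand_2 : List String) : Prop :=
  (∀ s ∈ hand_1, PySem.Str.strIsdigit s = true ∨ s = "K" ∨ s = "Q" ∨ s = "J" ∨ s = "A") ∧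
  (∀ s ∈ hand_2, PySem.Str.strIsdigit s = true ∨ s = "K" ∨ s = "Q" ∨ s = "J" ∨ s = "A")
instance (hand_1 : List String) (hand_2 : List String) : Decidable (Pre_blackjack_hand_greater_than hand_1 hand_2) := by unfold Pre_blackjack_hand_greater_than; infer_instance

def pvWitness_blackjack_hand_greater_than : List String × List String := (["A", "10"], ["K", "Q"])

def Spec_blackjack_hand_greater_than (hand_1 : List String) (hand_2 : List String) (out : Bool) : Prop := out = blackjack_hand_greater_than_alt hand_1 hand_2
instance (hand_1 : List String) (hand_2 : List String) (out : Bool) : Decidable (Spec_blackjack_hand_greater_than hand_1 hand_2 out) := by unfold Spec_blackjack_hand_greater_than; infer_instance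

-- ===== CLAIM (what is proved, stated in full; the proofs are below) =====
def Claim_equal_blackjack_hand_greater_than : Prop := ∀ (hand_1 : List String) (hand_2 : List String), Dom_blackjack_hand_greater_than hand_1 hand_2 → Pre_blackjack_hand_greater_than hand_1 hand_2 → Spec_blackjack_hand_greater_than hand_1 hand_2 (blackjack_hand_greater_than hand_1 hand_2)

-- ===== LEMMAS AND PROOFS =====

lemma pvMapCast_nonneg (o : Option Nat) :
    0 ≤ (Option.map (fun n => (n : Int)) (o.bind fun a => pure ((a : Int)))).getD 0 := by
  cases o <;> simp

-- int(s) cannot be negative when s contains no '-'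
lemma pvOfChars_nonneg (l : List Char) (h : '-' ∉ l) :
    0 ≤ (PySem.Int.ofChars? l).getD 0 := by
  unfold PySem.Int.ofChars?
  dsimp only []
  split
  · rename_i ds heq
    exfalso
    apply h
    have h1 : '-' ∈ (List.dropWhile PySem.Int.isIntSpace
        (List.dropWhile PySem.Int.isIntSpace l).reverse).reverse := by
      rw [heq]; exact List.mem_cons_self
    rw [List.mem_reverse] at h1
    have h2 := (List.dropWhile_sublist (p := PySem.Int.isIntSpace)
        (l := (List.dropWhile PySem.Int.isIntSpace l).reverse)).mem h1
    rw [List.mem_reverse] at h2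
    exact (List.dropWhile_sublist (p := PySem.Int.isIntSpace) (l := l)).mem h2
  · exact pvMapCast_nonneg _
  · exact pvMapCast_nonneg _

lemma pvDigit_nonneg (i : String) (h : PySem.Str.strIsdigit i = true) :
    0 ≤ (PySem.Int.ofStr? i).getD 0 := by
  apply pvOfChars_nonneg
  intro hm
  simp only [PySem.Str.strIsdigit, PySem.Chars.strIsdigit, Bool.and_eq_true,
    List.all_eq_true] at h
  exact absurd (h.2 '-' hm) (by decide)

lemma pvDigit_ne_A (i : String) (h : PySem.Str.strIsdigit i = true) : i ≠ "A" := by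
  rintro rfl; exact absurd h (by decide)

lemma pvValsB_mk : pvValsB = PySem.Dict.mk [("K", 10), ("Q", 10), ("J", 10), ("A", 1)] := by
  decide

lemma pvDictA_mk : pvDictA = PySem.Dict.mk [("K", 10), ("Q", 10), ("J", 10), ("A", 11)] := by
  decide

lemma pvGetB (i : String) : (pvValsB.get? i).getD 0 =
    if i = "K" then 10 else if i = "Q" then 10 else if i = "J" then 10 else
    if i = "A" then 1 else 0 := by
  by_cases h1 : i = "K"
  · subst h1; decide
  by_cases h2 : i = "Q"
  · subst h2; decide
  by_cases h3 : i = "J"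
  · subst h3; decide
  by_cases h4 : i = "A"
  · subst h4; decide
  rw [if_neg h1, if_neg h2, if_neg h3, if_neg h4, pvValsB_mk]
  simp [Ne.symm h1, Ne.symm h2, Ne.symm h3, Ne.symm h4, PySem.Dict.get?]

lemma pvGetA (i : String) : (pvDictA.get? i).getD 0 =
    if i = "K" then 10 else if i = "Q" then 10 else if i = "J" then 10 else
    if i = "A" then 11 else 0 := by
  by_cases h1 : i = "K"
  · subst h1; decide
  by_cases h2 : i = "Q"
  · subst h2; decide
  by_cases h3 : i = "J"
  · subst h3; decide
  by_cases h4 : i = "A"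
  · subst h4; decide
  rw [if_neg h1, if_neg h2, if_neg h3, if_neg h4, pvDictA_mk]
  simp [Ne.symm h1, Ne.symm h2, Ne.symm h3, Ne.symm h4, PySem.Dict.get?]

lemma pvTermB_ge (i : String) : (if i = "A" then (1 : Int) else 0) ≤ pvTermB i := by
  unfold pvTermB
  by_cases hd : PySem.Str.strIsdigit i = true
  · rw [if_pos hd, if_neg (pvDigit_ne_A i hd)]
    exact pvDigit_nonneg i hd
  · rw [if_neg hd, pvGetB]
    split_ifs <;> omega

lemma pvTermA_eq (i : String) : pvTermA i = pvTermB i + (if i = "A" then 10 else 0) := by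
  unfold pvTermA pvTermB
  by_cases hd : PySem.Str.strIsdigit i = true
  · rw [if_pos hd, if_pos hd, if_neg (pvDigit_ne_A i hd), add_zero]
  · rw [if_neg hd, if_neg hd, pvGetA, pvGetB]
    split_ifs <;> simp_all

lemma pvFoldlAdd (f : String → Int) (l : List String) (a : Int) :
    l.foldl (fun acc i => acc + f i) a = a + (l.map f).sum :=
  PySem.List.foldl_add l f a

lemma pvSumA_eq (l : List String) :
    (l.map pvTermA).sum = (l.map pvTermB).sum + 10 * (l.count "A" : Int) := by
  induction l with
  | nil => simp
  | cons x xs ih =>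
    simp only [List.map_cons, List.sum_cons, ih, List.count_cons, pvTermA_eq x]
    by_cases hx : x = "A" <;> simp [hx] <;> [push_cast; skip] <;> ring

lemma pvSumB_ge (l : List String) : (l.count "A" : Int) ≤ (l.map pvTermB).sum := by
  induction l with
  | nil => simp
  | cons x xs ih =>
    simp only [List.map_cons, List.sum_cons, List.count_cons]
    have h := pvTermB_ge x
    by_cases hx : x = "A" <;> simp [hx] at h ⊢ <;> [push_cast; skip] <;> omega

lemma pvLoopA_high (b : Int) (k : Nat) (h : 21 < b + 10) : pvLoopA (b + 10 * k) k = b := by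
  induction k with
  | zero => simp [pvLoopA]
  | succ m ih =>
    have hgt : b + 10 * ((m : Nat) + 1 : Nat) > 21 := by push_cast; omega
    simp only [pvLoopA, if_pos hgt]
    have he : b + 10 * ((m : Nat) + 1 : Nat) - 10 = b + 10 * (m : Nat) := by push_cast; ring
    rw [he, ih]

lemma pvLoopA_low (b : Int) (k : Nat) (h1 : b + 10 ≤ 21) (h2 : 1 ≤ k) (hb : (k : Int) ≤ b) :
    pvLoopA (b + 10 * k) k = b + 10 := by
  induction k with
  | zero => omega
  | succ m ih =>
    by_cases hm : m = 0
    · subst hm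
      have hng : ¬ b + 10 * ((0 : Nat) + 1 : Nat) > 21 := by push_cast; omega
      simp only [pvLoopA, if_neg hng]
      push_cast; ring
    · have hm1 : 1 ≤ m := Nat.one_le_iff_ne_zero.mpr hm
      have hbm : (m : Int) ≤ b := by push_cast at hb ⊢; omega
      have hgt : b + 10 * ((m : Nat) + 1 : Nat) > 21 := by push_cast at hb ⊢; omega
      simp only [pvLoopA, if_pos hgt]
      have he : b + 10 * ((m : Nat) + 1 : Nat) - 10 = b + 10 * (m : Nat) := by push_cast; ring
      rw [he, ih hm1 hbm]

lemma pvScore_eq (hand : List String) : pvCalcScoreA hand = pvScoreB hand := by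
  unfold pvCalcScoreA pvScoreB
  rw [pvFoldlAdd, pvFoldlAdd, zero_add, zero_add, pvSumA_eq, PySem.List.count_eq]
  have hge := pvSumB_ge hand
  set b := (hand.map pvTermB).sum with hb
  by_cases hA : "A" ∈ hand
  · have hcont : hand.contains "A" = true := by simpa using hA
    have hcnt : 1 ≤ hand.count "A" := List.count_pos_iff.mpr hA
    rw [hcont]
    by_cases hfit : b + 10 ≤ 21
    · by_cases ha1 : hand.count "A" = 1
      · rw [ha1]
        have : ¬ b + 10 * ((1 : Nat) : Int) > 21 := by push_cast; omega
        simp [hfit]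
      · have ha2 : 2 ≤ hand.count "A" := by omega
        have hgt : b + 10 * (hand.count "A" : Int) > 21 := by
          have : (2 : Int) ≤ (hand.count "A" : Int) := by exact_mod_cast ha2
          omega
        simp only [Bool.true_and, decide_eq_true_eq, if_pos hgt,
          pvLoopA_low b (hand.count "A") hfit hcnt hge, if_pos hfit]
    · have hgt : b + 10 * (hand.count "A" : Int) > 21 := by
        have : (1 : Int) ≤ (hand.count "A" : Int) := by exact_mod_cast hcnt
        omega
      simp only [Bool.true_and, decide_eq_true_eq, if_pos hgt,
        pvLoopA_high b (hand.count "A") (by omega), if_neg hfit]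
  · have hcont : hand.contains "A" = false := by simpa using hA
    have hcnt : hand.count "A" = 0 := List.count_eq_zero.mpr hA
    rw [hcont, hcnt]
    simp

-- ===== VERDICT (by name: the statement is the Claim_ definition above) =====
theorem blackjack_hand_greater_than_spec : Claim_equal_blackjack_hand_greater_than := by
  intro h1 h2 _ _
  unfold Spec_blackjack_hand_greater_than blackjack_hand_greater_than blackjack_hand_greater_than_alt
  rw [pvScore_eq, pvScore_eq]
  cases hc : ((decide (pvScoreB h2 > 21) || decide (pvScoreB h1 > pvScoreB h2)) && decide (pvScoreB h1 ≤ 21)) <;> simp [hc]
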